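-- pv_equiv track=rewrite | github.com/HHansi/MultiEventMiner | experiments/data_process/data_util.py | get_token_test_instances
-- ===== SOURCE A (Python) =====
-- def get_token_test_instances(tokens):
--     """
--     Load test sentences (NER)
--     :param tokens: list of tokens
--     :return: list, dict,
--         list of sentence tokens
--         dict {instance_index: [sentence indices in list of sentence tokens]}
--     """
--     sentence_tokens = []
--     dict_instance_sentence = dict()
--     sentence_index = -1
--
--     for idx, temp_tokens in enumerate(tokens):
--         instance_sentence_indices = []
--         SEP_indices = [i for i, value in enumerate(temp_tokens) if value == '[SEP]']
--
--         if len(SEP_indices) == 0:  # If no [SEP] labels found, the instance has one sentence.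
--             sentence_tokens.append(temp_tokens)
--             sentence_index += 1
--             instance_sentence_indices.append(sentence_index)
--         else:
--             SEP_indices.insert(0, -1)  # Add the index of -1 to the beginning
--             SEP_indices.insert(len(SEP_indices), len(temp_tokens))
--
--             for i in range(0, len(SEP_indices)):
--                 if i < (len(SEP_indices) - 1):
--                     temp_sent_tokens = temp_tokens[SEP_indices[i] + 1:SEP_indices[i + 1]]
--
--                     sentence_tokens.append(temp_sent_tokens)
--                     sentence_index += 1
--                     instance_sentence_indices.append(sentence_index)
--         dict_instance_sentence[idx] = instance_sentence_indices
--
--     return sentence_tokens, dict_instance_sentence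
-- ===== SOURCE B (Python) =====
-- def get_token_test_instances(tokens):
--     """Single-pass split on '[SEP]' with a current-sentence accumulator."""
--     sentence_tokens = []
--     dict_instance_sentence = dict()
--     sentence_index = -1
--
--     for idx, temp_tokens in enumerate(tokens):
--         indices = []
--         current = []
--         for token in temp_tokens:
--             if token == '[SEP]':
--                 sentence_tokens.append(current)
--                 sentence_index += 1
--                 indices.append(sentence_index)
--                 current = []
--             else:
--                 current.append(token)
--         sentence_tokens.append(current)
--         sentence_index += 1
--         indices.append(sentence_index)
--         dict_instance_sentence[idx] = indices
--
--     return sentence_tokens, dict_instance_sentence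
-- ===== Notes on version B (the rewrite author's own statement) =====
-- stated objective: simpler
-- what changed: Replaces A's two-phase per-instance work (collect all [SEP] positions, pad them with -1 and len, then slice between consecutive positions, with a separate no-SEP branch) by a single pass over the tokens with a current-sentence accumulator that is flushed on each '[SEP]' and once at the end, which unifies the no-SEP case with the general case.
import Mathlib
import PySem

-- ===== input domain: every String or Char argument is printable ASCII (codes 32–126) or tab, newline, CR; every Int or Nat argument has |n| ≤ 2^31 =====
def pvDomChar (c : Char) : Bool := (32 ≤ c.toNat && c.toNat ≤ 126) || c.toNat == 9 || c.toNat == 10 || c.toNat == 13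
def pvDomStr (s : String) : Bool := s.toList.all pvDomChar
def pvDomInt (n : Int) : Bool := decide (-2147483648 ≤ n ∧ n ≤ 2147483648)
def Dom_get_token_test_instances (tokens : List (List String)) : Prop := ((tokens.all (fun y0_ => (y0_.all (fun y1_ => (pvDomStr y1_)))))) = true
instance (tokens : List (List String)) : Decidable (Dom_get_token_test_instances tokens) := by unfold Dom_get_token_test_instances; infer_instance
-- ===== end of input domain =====

-- B replaces A's SEP-index collection + slicing with a single pass that accumulates the
-- current sentence and flushes it on each '[SEP]' and once at the end (objective: simpler).

-- ===== PORT A =====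
-- [i for i, value in enumerate(temp_tokens) if value == '[SEP]']
def pvSepIdxs (temp : List String) : List Int :=
  ((PySem.List.enumerate temp).filter (fun q => q.2 == "[SEP]")).map (fun q => q.1)

-- body of A's inner 'for i in range(0, len(SEP_indices))' loop; state = (sentence_tokens, sentence_index, instance_sentence_indices)
def pvAInner (temp : List String) (S : List Int)
    (st2 : List (List String) × Int × List Int) (i : Int) :
    List (List String) × Int × List Int :=
  if i < (S.length : Int) - 1 then
    -- S[i] / S[i+1]: i is in range here, so pyGetD is exact
    let a := PySem.List.pyGetD S i 0
    let b := PySem.List.pyGetD S (i + 1) 0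
    (st2.1 ++ [PySem.List.slice temp (some (a + 1)) (some b)], st2.2.1 + 1, st2.2.2 ++ [st2.2.1 + 1])
  else st2

-- body of A's outer loop; state = (sentence_tokens, dict_instance_sentence, sentence_index)
def pvAStep (st : List (List String) × PySem.Dict Int (List Int) × Int)
    (p : Int × List String) : List (List String) × PySem.Dict Int (List Int) × Int :=
  let SEPidx := pvSepIdxs p.2
  if SEPidx.length == 0 then
    (st.1 ++ [p.2], st.2.1.insert p.1 [st.2.2 + 1], st.2.2 + 1)
  else
    let S : List Int := (-1 : Int) :: SEPidx ++ [(p.2.length : Int)]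
    let r := (PySem.List.pyRange 0 (S.length : Int) 1).foldl (pvAInner p.2 S) (st.1, st.2.2, ([] : List Int))
    (r.1, st.2.1.insert p.1 r.2.2, r.2.1)

def get_token_test_instances (tokens : List (List String)) : List (List String) × (List (Int × List Int)) :=
  let r := (PySem.List.enumerate tokens).foldl pvAStep ([], PySem.Dict.empty, -1)
  (r.1, r.2.1.items)

-- ===== PORT B =====
-- body of B's inner 'for token in temp_tokens'; state = (sentence_tokens, sentence_index, indices, current)
def pvBInner (st2 : List (List String) × Int × List Int × List String) (token : String) :
    List (List String) × Int × List Int × List String :=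
  if token == "[SEP]" then
    (st2.1 ++ [st2.2.2.2], st2.2.1 + 1, st2.2.2.1 ++ [st2.2.1 + 1], ([] : List String))
  else
    (st2.1, st2.2.1, st2.2.2.1, st2.2.2.2 ++ [token])

-- body of B's outer loop: inner pass, then the unconditional final flush
def pvBStep (st : List (List String) × PySem.Dict Int (List Int) × Int)
    (p : Int × List String) : List (List String) × PySem.Dict Int (List Int) × Int :=
  let r := p.2.foldl pvBInner (st.1, st.2.2, ([] : List Int), ([] : List String))
  (r.1 ++ [r.2.2.2], st.2.1.insert p.1 (r.2.2.1 ++ [r.2.1 + 1]), r.2.1 + 1)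

def get_token_test_instances_alt (tokens : List (List String)) : List (List String) × (List (Int × List Int)) :=
  let r := (PySem.List.enumerate tokens).foldl pvBStep ([], PySem.Dict.empty, -1)
  (r.1, r.2.1.items)

-- ===== PRECONDITION & SPEC =====
def Spec_get_token_test_instances (tokens : List (List String)) (out : List (List String) × (List (Int × List Int))) : Prop := out = get_token_test_instances_alt tokens
instance (tokens : List (List String)) (out : List (List String) × (List (Int × List Int))) : Decidable (Spec_get_token_test_instances tokens out) := by unfold Spec_get_token_test_instances; infer_instance

-- ===== CLAIM (what is proved, stated in full; the proofs are below) =====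
def Claim_equal_get_token_test_instances : Prop := ∀ (tokens : List (List String)), Dom_get_token_test_instances tokens → Spec_get_token_test_instances tokens (get_token_test_instances tokens)

-- ===== LEMMAS AND PROOFS =====

lemma pvEnumShift (r : List String) : ∀ s : Int,
    PySem.List.enumerate r (s + 1) = (PySem.List.enumerate r s).map (fun p => (p.1 + 1, p.2)) := by
  induction r with
  | nil => intro s; simp [PySem.List.enumerate_nil]
  | cons t r ih => intro s; simp [PySem.List.enumerate_cons, ih]

lemma pvSepIdxs_cons (t : String) (r : List String) :
    pvSepIdxs (t :: r) =
      if t == "[SEP]" then 0 :: (pvSepIdxs r).map (· + 1) else (pvSepIdxs r).map (· + 1) := by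
  unfold pvSepIdxs
  rw [PySem.List.enumerate_cons]
  rw [show (0:Int) + 1 = 0 + 1 from rfl, pvEnumShift]
  simp [List.filter_cons, List.filter_map, List.map_map, Function.comp_def]
  split <;> simp

lemma pvSepIdxs_nonneg (temp : List String) : ∀ x ∈ pvSepIdxs temp, 0 ≤ x := by
  induction temp with
  | nil => simp [pvSepIdxs, PySem.List.enumerate_nil]
  | cons t r ih =>
    rw [pvSepIdxs_cons]
    split <;> intro x hx <;> simp at hx
    · rcases hx with h | ⟨y, hy, h⟩
      · omega
      · have := ih y hy; omega
    · rcases hx with ⟨y, hy, h⟩; have := ih y hy; omega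

def pvSpl : List String → List (List String) × List String
  | [] => ([], [])
  | t :: r =>
    let p := pvSpl r
    if t == "[SEP]" then ([] :: p.1, p.2)
    else
      match p.1 with
      | [] => ([], t :: p.2)
      | s :: ss => ((t :: s) :: ss, p.2)

lemma pvSpl_noSEP (temp : List String) (h : pvSepIdxs temp = []) : pvSpl temp = ([], temp) := by
  induction temp with
  | nil => rfl
  | cons t r ih =>
    rw [pvSepIdxs_cons] at h
    by_cases ht : t == "[SEP]"
    · simp [ht] at h
    · simp [ht] at h
      simp [pvSpl, ht, ih h]

lemma pvBInner_foldl (temp : List String) : ∀ (cur : List String) (sents : List (List String)) (si : Int) (idxs : List Int),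
    temp.foldl pvBInner (sents, si, idxs, cur) =
      (sents ++ (match (pvSpl temp).1 with
                 | [] => []
                 | s :: ss => (cur ++ s) :: ss),
       si + ((pvSpl temp).1.length : Int),
       idxs ++ (List.range (pvSpl temp).1.length).map (fun j => si + 1 + (j : Int)),
       (match (pvSpl temp).1 with
        | [] => cur ++ (pvSpl temp).2
        | _ :: _ => (pvSpl temp).2)) := by
  induction temp with
  | nil => intro cur sents si idxs; simp [pvSpl]
  | cons t r ih =>
    intro cur sents si idxs
    rw [List.foldl_cons]
    by_cases ht : t == "[SEP]"
    · simp only [pvBInner, ht, if_pos]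
      rw [ih]
      simp only [pvSpl, ht, if_pos]
      rcases hr : (pvSpl r).1 with _ | ⟨s, ss⟩
      · simp [List.range_succ_eq_map]
      · simp [List.range_succ_eq_map, List.map_map, Function.comp_def, List.append_assoc]
        constructor
        · omega
        · simp only [List.flatMap_map, ← List.map_eq_flatMap, List.map_map]
          apply List.map_congr_left; intro j hj; simp only [Function.comp_def]; push_cast; omega
    · simp only [pvBInner, ht, if_neg, Bool.false_eq_true, not_false_iff]
      rw [ih]
      simp only [pvSpl, ht]
      rcases (pvSpl r).1 with _ | ⟨s, ss⟩ <;> simp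

def pvPS (temp : List String) : List Int → List (List String)
  | a :: b :: rest => PySem.List.slice temp (some (a + 1)) (some b) :: pvPS temp (b :: rest)
  | _ => []

def pvConsume (temp : List String) : List Int → (List (List String) × Int × List Int) → (List (List String) × Int × List Int)
  | a :: b :: rest, st =>
      pvConsume temp (b :: rest) (st.1 ++ [PySem.List.slice temp (some (a + 1)) (some b)], st.2.1 + 1, st.2.2 ++ [st.2.1 + 1])
  | _, st => st

lemma pvAInner_foldl_aux (temp : List String) (S : List Int) :
    ∀ (k j : Nat), S.length = j + k → ∀ st,
      (PySem.List.pyRange (j : Int) (S.length : Int) 1).foldl (pvAInner temp S) st = pvConsume temp (S.drop j) st := by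
  intro k
  induction k with
  | zero =>
    intro j h st
    rw [PySem.List.pyRange_one_eq_nil (by omega)]
    rw [List.drop_eq_nil_of_le (by omega)]
    rfl
  | succ k ih =>
    intro j h st
    rw [PySem.List.pyRange_one_cons (by push_cast; omega)]
    rw [List.foldl_cons]
    have hd : S.drop j = S[j] :: S.drop (j + 1) := by
      rw [List.drop_eq_getElem_cons (by omega)]
    rcases k with _ | k
    · -- last index: condition false, loop body a no-op, one element left
      have hbody : pvAInner temp S st (j : Int) = st := by
        unfold pvAInner
        rw [if_neg (by push_cast; omega)]
      rw [hbody]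
      rw [show ((j : Int) + 1) = ((j + 1 : Nat) : Int) by push_cast; ring]
      rw [ih (j + 1) (by omega), List.drop_eq_nil_of_le (by omega)]
      rw [hd, List.drop_eq_nil_of_le (by omega)]
      rfl
    · have hd2 : S.drop (j + 1) = S[j + 1] :: S.drop (j + 2) := by
        rw [List.drop_eq_getElem_cons (by omega)]
      have hbody : pvAInner temp S st (j : Int) =
          (st.1 ++ [PySem.List.slice temp (some (S[j] + 1)) (some S[j + 1])], st.2.1 + 1, st.2.2 ++ [st.2.1 + 1]) := by
        unfold pvAInner
        rw [if_pos (by push_cast; omega)]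
        have h1 : PySem.List.pyGetD S (j : Int) 0 = S[j] := by
          rw [PySem.List.pyGetD_natCast]
          exact List.getD_eq_getElem S 0 (by omega)
        have h2 : PySem.List.pyGetD S ((j : Int) + 1) 0 = S[j + 1] := by
          rw [show ((j : Int) + 1) = ((j + 1 : Nat) : Int) by push_cast; ring]
          rw [PySem.List.pyGetD_natCast]
          exact List.getD_eq_getElem S 0 (by omega)
        simp only [h1, h2]
      rw [hbody]
      rw [show ((j : Int) + 1) = ((j + 1 : Nat) : Int) by push_cast; ring]
      rw [ih (j + 1) (by omega)]
      rw [hd, hd2]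
      rfl

lemma pvAInner_foldl (temp : List String) (S : List Int) (st : List (List String) × Int × List Int) :
    (PySem.List.pyRange 0 (S.length : Int) 1).foldl (pvAInner temp S) st = pvConsume temp S st := by
  have := pvAInner_foldl_aux temp S S.length 0 (by omega) st
  simpa using this
lemma pvConsume_pure (temp : List String) : ∀ (M : List Int) (sents : List (List String)) (si : Int) (idxs : List Int),
    pvConsume temp M (sents, si, idxs) =
      (sents ++ pvPS temp M, si + ((pvPS temp M).length : Int),
       idxs ++ (List.range (pvPS temp M).length).map (fun j => si + 1 + (j : Int))) := by
  intro M
  induction M with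
  | nil => intro sents si idxs; simp [pvConsume, pvPS]
  | cons a M ih =>
    rcases M with _ | ⟨b, rest⟩
    · intro sents si idxs; simp [pvConsume, pvPS]
    · intro sents si idxs
      show pvConsume temp (b :: rest) _ = _
      rw [ih]
      simp only [pvPS]
      simp [List.range_succ_eq_map, List.map_map, Function.comp_def, List.append_assoc]
      refine ⟨by push_cast; omega, ?_⟩
      simp only [List.flatMap_map, ← List.map_eq_flatMap, List.map_map]
      apply List.map_congr_left; intro j hj; simp only [Function.comp_def]; push_cast; omega

lemma pvPS_shift (t : String) (r : List String) : ∀ (M : List Int), (∀ x ∈ M, -1 ≤ x) → (∀ x ∈ M.tail, 0 ≤ x) →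
    pvPS (t :: r) (M.map (· + 1)) = pvPS r M := by
  intro M
  induction M with
  | nil => intro _ _; rfl
  | cons a M ih =>
    intro h1 h2
    rcases M with _ | ⟨b, rest⟩
    · rfl
    · simp only [List.map_cons, pvPS]
      have ha : -1 ≤ a := h1 a (by simp)
      have hb : 0 ≤ b := h2 b (by simp)
      refine List.cons_eq_cons.mpr ⟨?_, ?_⟩
      · -- slice (t :: r) (a+2) (b+1) = slice r (a+1) b
        obtain ⟨a', ha'⟩ : ∃ a' : Nat, a + 1 = (a' : Int) := ⟨(a+1).toNat, by omega⟩
        obtain ⟨b', hb'⟩ : ∃ b' : Nat, b = (b' : Int) := ⟨b.toNat, by omega⟩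
        rw [ha', hb']
        rw [show (a' : Int) + 1 = ((a' + 1 : Nat) : Int) by push_cast; ring]
        rw [show (b' : Int) + 1 = ((b' + 1 : Nat) : Int) by push_cast; ring]
        rw [PySem.List.slice_natCast, PySem.List.slice_natCast]
        simp only [List.drop_succ_cons]
        congr 1
        omega
      · have := ih (fun x hx => by have := h1 x (List.mem_cons_of_mem _ hx); omega)
          (fun x hx => h2 x (by exact List.mem_cons_of_mem _ hx))
        simpa using this

lemma pvCore (temp : List String) :
    pvPS temp ((-1) :: pvSepIdxs temp ++ [(temp.length : Int)]) = (pvSpl temp).1 ++ [(pvSpl temp).2] := by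
  induction temp with
  | nil =>
    simp [pvSepIdxs, PySem.List.enumerate_nil, pvSpl, pvPS]
    rfl
  | cons t r ih =>
    rw [pvSepIdxs_cons]
    have hnn := pvSepIdxs_nonneg r
    by_cases ht : t == "[SEP]"
    · simp only [ht, if_pos]
      have hmap : (0 : Int) :: ((pvSepIdxs r).map (· + 1) ++ [((t :: r).length : Int)]) =
          ((-1 : Int) :: pvSepIdxs r ++ [(r.length : Int)]).map (· + 1) := by
        simp [List.map_append]
      show pvPS (t :: r) ((-1) :: 0 :: ((pvSepIdxs r).map (· + 1) ++ [((t :: r).length : Int)])) = _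
      rw [show pvPS (t :: r) ((-1) :: 0 :: ((pvSepIdxs r).map (· + 1) ++ [((t :: r).length : Int)])) =
          PySem.List.slice (t :: r) (some 0) (some 0) ::
            pvPS (t :: r) ((0 : Int) :: ((pvSepIdxs r).map (· + 1) ++ [((t :: r).length : Int)])) from by
        simp [pvPS]]
      rw [hmap, pvPS_shift t r _ (by
          intro x hx
          simp at hx
          rcases hx with h | h | h
          · omega
          · have := hnn x h; omega
          · omega)
        (by
          intro x hx
          simp at hx
          rcases hx with h | h
          · exact hnn x h
          · omega)]
      rw [ih]
      have hslice : PySem.List.slice (t :: r) (some (0 : Int)) (some (0 : Int)) = ([] : List String) := by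
        rw [show ((0:Int)) = ((0 : Nat) : Int) from rfl, PySem.List.slice_natCast]
        simp
      rw [hslice]
      simp [pvSpl, ht]
    · simp only [ht, if_neg, Bool.false_eq_true, not_false_iff]
      rcases hI : pvSepIdxs r with _ | ⟨c, I'⟩
      · have hr := pvSpl_noSEP r hI
        show pvPS (t :: r) ((-1) :: ([] ++ [((t :: r).length : Int)])) = _
        have : pvPS (t :: r) [(-1 : Int), ((t :: r).length : Int)] =
            [PySem.List.slice (t :: r) (some 0) (some ((t :: r).length : Int))] := by
          simp [pvPS]
        simp only [List.nil_append, this]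
        rw [show ((0:Int)) = ((0 : Nat) : Int) from rfl, PySem.List.slice_natCast]
        simp [pvSpl, ht, hr]
      · have hc : 0 ≤ c := hnn c (by rw [hI]; simp)
        have hIH := ih
        rw [hI] at hIH
        have hsplit : pvPS r ((-1) :: c :: I' ++ [(r.length : Int)]) =
            PySem.List.slice r (some 0) (some c) :: pvPS r (c :: I' ++ [(r.length : Int)]) := by
          simp [pvPS]
        rw [hsplit] at hIH
        rcases hP : (pvSpl r).1 with _ | ⟨s, ss⟩
        · exfalso
          rw [hP] at hIH
          rcases I' with _ | ⟨d, I''⟩ <;> simp [pvPS] at hIH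
        · rw [hP, List.cons_append] at hIH
          have hmap2 : ((c :: I').map (· + 1) ++ [((t :: r).length : Int)]) =
              ((c :: I' ++ [(r.length : Int)]).map (· + 1)) := by
            simp [List.map_append]
          have hfirst : pvPS (t :: r) ((-1) :: ((c :: I').map (· + 1) ++ [((t :: r).length : Int)])) =
              PySem.List.slice (t :: r) (some 0) (some (c + 1)) ::
                pvPS (t :: r) ((c :: I' ++ [(r.length : Int)]).map (· + 1)) := by
            rw [← hmap2]
            simp [pvPS]
          have hsl : PySem.List.slice (t :: r) (some (0:Int)) (some (c + 1)) = t :: PySem.List.slice r (some 0) (some c) := by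
            obtain ⟨c', hc'⟩ : ∃ c' : Nat, c = (c' : Int) := ⟨c.toNat, by omega⟩
            rw [hc', show (c' : Int) + 1 = ((c' + 1 : Nat) : Int) by push_cast; ring]
            rw [show ((0:Int)) = ((0 : Nat) : Int) from rfl]
            rw [PySem.List.slice_natCast, PySem.List.slice_natCast]
            simp
          show pvPS (t :: r) ((-1) :: ((c :: I').map (· + 1) ++ [((t :: r).length : Int)])) = _
          rw [hfirst, pvPS_shift t r _ (by
              intro x hx
              simp at hx
              rcases hx with h | h | h
              · omega
              · have := hnn x (by rw [hI]; simp [h]); omega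
              · omega)
            (by
              intro x hx
              simp at hx
              rcases hx with h | h
              · have := hnn x (by rw [hI]; simp [h]); omega
              · omega), hsl]
          have hkey := congrArg
            (fun l => match l with
              | x :: xs => (t :: x) :: xs
              | [] => ([] : List (List String))) hIH
          simp only at hkey
          exact hkey.trans (by simp [pvSpl, ht, hP])

lemma pvStep_eq : pvAStep = pvBStep := by
  funext st p
  obtain ⟨sents, dict, si⟩ := st
  obtain ⟨idx, temp⟩ := p
  unfold pvAStep pvBStep
  simp only []
  rw [pvBInner_foldl]
  by_cases h0 : (pvSepIdxs temp).length = 0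
  · have hI : pvSepIdxs temp = [] := List.length_eq_zero_iff.mp h0
    have hspl := pvSpl_noSEP temp hI
    simp [hI, hspl]
  · rw [if_neg (by simpa using h0)]
    rw [pvAInner_foldl, pvConsume_pure, pvCore]
    rcases hP : (pvSpl temp).1 with _ | ⟨s, ss⟩
    · simp [List.range_succ]
    · simp [hP, List.range_succ, List.map_append, List.append_assoc]
      exact ⟨by ring_nf, by ring⟩

-- ===== VERDICT (by name: the statement is the Claim_ definition above) =====
theorem get_token_test_instances_spec : Claim_equal_get_token_test_instances := by
  intro tokens _
  unfold Spec_get_token_test_instances get_token_test_instances get_token_test_instances_alt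
  rw [pvStep_eq]
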